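-- pv_equiv track=rewrite | github.com/LBNL-ETA/frads | frads/parsers.py | parse_idf
-- ===== SOURCE A (Python) =====
-- from typing import Dict
-- from typing import List
--
-- def parse_idf(content: str) -> dict:
--     """Parse an IDF file into a dictionary."""
--     sections = content.rstrip().split(";")
--     sub_sections: List[List[str]] = []
--     obj_dict: Dict[str, List[List[str]]] = {}
--     for sec in sections:
--         sec_lines = sec.splitlines()
--         _lines = []
--         for sl in sec_lines:
--             content = sl.split("!")[0]
--             if content != "":
--                 _lines.append(content)
--         _lines = " ".join(_lines).split(",")
--         clean_lines = [i.strip() for i in _lines]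
--         sub_sections.append(clean_lines)
--
--     for ssec in sub_sections:
--         obj_dict[ssec[0].lower()] = []
--     for ssec in sub_sections:
--         obj_dict[ssec[0].lower()].append(ssec[1:])
--     return obj_dict
-- ===== SOURCE B (Python) =====
-- def _record(sec: str) -> list:
--     """Clean one section: drop end-of-line comments, join code lines, split fields."""
--     code = " ".join(p for l in sec.splitlines() if (p := l.partition("!")[0]))
--     return [f.strip() for f in code.split(",")]
--
--
-- def parse_idf(content: str) -> dict:
--     """Parse an IDF file into a dictionary.
--
--     Different decomposition: clean each section into a record in one
--     comprehension pass, then group WITHOUT a dict accumulator: collect the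
--     distinct lowercased head keys in first-appearance order and build each
--     key's group by a filtering scan of the record list.
--     """
--     records = [_record(sec) for sec in content.rstrip().split(";")]
--     keys = []
--     for r in records:
--         k = r[0].lower()
--         if k not in keys:
--             keys.append(k)
--     return {k: [r[1:] for r in records if r[0].lower() == k] for k in keys}
-- ===== Notes on version B (the rewrite author's own statement) =====
-- stated objective: alternative
-- what changed: A groups with a dict accumulator in two passes (create every key with an empty list, then append each tail); B never accumulates into a dict: it collects the distinct lowercased head keys in first-appearance order and builds each key's group by a filtering scan of the record list, assembling the dict once in a comprehension.
import Mathlib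
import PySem

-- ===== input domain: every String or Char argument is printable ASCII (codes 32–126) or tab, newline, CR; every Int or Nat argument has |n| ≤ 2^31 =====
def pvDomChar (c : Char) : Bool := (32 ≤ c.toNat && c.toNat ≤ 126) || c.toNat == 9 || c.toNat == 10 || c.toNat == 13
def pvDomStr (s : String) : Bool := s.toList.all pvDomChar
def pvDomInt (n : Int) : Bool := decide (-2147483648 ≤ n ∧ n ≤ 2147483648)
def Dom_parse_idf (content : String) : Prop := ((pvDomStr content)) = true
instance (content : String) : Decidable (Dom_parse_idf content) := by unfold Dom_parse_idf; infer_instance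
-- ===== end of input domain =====

-- B groups without a dict accumulator: it collects the distinct lowercased head keys in
-- first-appearance order and builds each group by a filtering scan of the record list;
-- objective: alternative (different grouping algorithm, same result).

-- s.split(sep) for a NONEMPTY literal sep (";", "!", ","): PySem.Str.split? is none only for sep = "",
-- which neither Python ever passes, so the .getD [] branch is unreachable.
def pySplit (s sep : String) : List String := (PySem.Str.split? s sep).getD []

-- ===== PORT A =====
def parse_idf (content : String) : List (String × List (List String)) :=
  let sections := pySplit (PySem.Str.rstrip content) ";"
  let sub_sections := sections.foldl (fun subs sec =>
      let sec_lines := PySem.Str.splitlines sec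
      let lines0 := sec_lines.foldl (fun ls sl =>
          -- content = sl.split("!")[0]: split(sep) always returns a nonempty list, so [0] is total
          let c := (pySplit sl "!").headD ""
          if c ≠ "" then ls ++ [c] else ls) []
      let lines1 := pySplit (PySem.Str.join " " lines0) ","
      let clean_lines := lines1.map (fun i => PySem.Str.strip i)
      subs ++ [clean_lines]) []
  -- first grouping pass: obj_dict[ssec[0].lower()] = []
  let d1 := sub_sections.foldl (fun d ssec =>
      d.insert (PySem.Str.lower (ssec.headD "")) ([] : List (List String))) PySem.Dict.empty
  -- second grouping pass: obj_dict[ssec[0].lower()].append(ssec[1:]) (the key is always present)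
  let d2 := sub_sections.foldl (fun d ssec =>
      d.modify (PySem.Str.lower (ssec.headD "")) [] (fun g => g ++ [PySem.List.slice ssec (some 1) none])) d1
  d2.items

-- ===== PORT B =====
-- _record(sec): l.partition("!")[0] is the text before the first "!", i.e. split("!")[0]
def record (sec : String) : List String :=
  (pySplit (PySem.Str.join " "
      (((PySem.Str.splitlines sec).map (fun l => (pySplit l "!").headD "")).filter (fun l => l ≠ ""))) ",").map
    (fun f => PySem.Str.strip f)

def parse_idf_alt (content : String) : List (String × List (List String)) :=
  let records := (pySplit (PySem.Str.rstrip content) ";").map record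
  -- keys: distinct lowercased heads, first-appearance order ('if k not in keys: keys.append(k)' = Set.add)
  let keys := records.foldl (fun ks r => PySem.Set.add ks (PySem.Str.lower (r.headD ""))) []
  -- {k: [r[1:] for r in records if r[0].lower() == k] for k in keys}: keys are distinct, so the
  -- dict comprehension's items are exactly this map in keys order
  keys.map (fun k => (k,
    (records.filter (fun r => PySem.Str.lower (r.headD "") == k)).map
      (fun r => PySem.List.slice r (some 1) none)))

-- ===== PRECONDITION & SPEC =====
def Spec_parse_idf (content : String) (out : List (String × List (List String))) : Prop := out = parse_idf_alt content
instance (content : String) (out : List (String × List (List String))) : Decidable (Spec_parse_idf content out) := by unfold Spec_parse_idf; infer_instance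

-- ===== CLAIM (what is proved, stated in full; the proofs are below) =====
def Claim_equal_parse_idf : Prop := ∀ (content : String), Dom_parse_idf content → Spec_parse_idf content (parse_idf content)

-- ===== LEMMAS AND PROOFS =====

-- A's comment-stripping loop builds exactly "map then filter"
lemma clean_loop (l : List String) (acc : List String) :
    l.foldl (fun ls sl =>
        if (pySplit sl "!").headD "" ≠ "" then ls ++ [(pySplit sl "!").headD ""] else ls) acc
      = acc ++ (l.map (fun ln => (pySplit ln "!").headD "")).filter (fun l => l ≠ "") := by
  induction l generalizing acc with
  | nil => simp
  | cons x xs ih =>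
      rw [List.foldl_cons]
      by_cases h : (pySplit x "!").headD "" ≠ ""
      · rw [if_pos h, ih, List.map_cons, List.filter_cons, if_pos (by simpa using h)]
        simp
      · rw [if_neg h, ih, List.map_cons, List.filter_cons, if_neg (by simpa using h)]

-- value left by A's first grouping pass
lemma getD_insert_nil_loop {κ : Type} [BEq κ] [LawfulBEq κ] (key : List String → κ)
    (sub : List (List String)) (d : PySem.Dict κ (List (List String))) (k : κ) :
    (sub.foldl (fun d s => d.insert (key s) ([] : List (List String))) d).getD k []
      = if k ∈ sub.map key then [] else d.getD k [] := by
  induction sub generalizing d with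
  | nil => simp
  | cons s sub ih =>
      simp only [List.foldl_cons, ih, List.map_cons, List.mem_cons]
      by_cases h1 : k ∈ sub.map key
      · simp [h1]
      · by_cases h2 : k = key s
        · simp [h2, PySem.Dict.getD_insert_self]
        · simp [h1, h2, PySem.Dict.getD_insert_of_ne _ _ _ h2]

-- core: A's two-pass dict grouping, as an item list, is B's "distinct keys, each with its
-- filtered group" map
lemma group_items (key : List String → String) (val : List String → List String)
    (sub : List (List String)) :
    (sub.foldl (fun d s => d.modify (key s) [] (fun g => g ++ [val s]))
        (sub.foldl (fun d s => d.insert (key s) ([] : List (List String))) PySem.Dict.empty)).items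
      = (PySem.Set.ofList (sub.map key)).map (fun k =>
          (k, (sub.filter (fun s => key s == k)).map val)) := by
  have hnd1 : ((sub.foldl (fun d s => d.insert (key s) ([] : List (List String))) PySem.Dict.empty)).keys.Nodup :=
    PySem.Dict.nodup_keys_foldl_insert_key sub key _ _ PySem.Dict.nodup_keys_empty
  have hndA := PySem.Dict.nodup_keys_foldl_modify_key sub key [] (fun _ s g => g ++ [val s]) _ hnd1
  have hfilter : List.filter (fun y => !(PySem.Set.ofList (sub.map key)).contains y)
      (PySem.Set.ofList (sub.map key)) = [] := by
    apply List.filter_eq_nil_iff.mpr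
    intro y hy
    simpa using hy
  have hkeys1 : ((sub.foldl (fun d s => d.insert (key s) ([] : List (List String))) PySem.Dict.empty)).keys
      = PySem.Set.ofList (sub.map key) := by
    rw [PySem.Dict.keys_foldl_insert_key, PySem.Dict.keys_empty, PySem.Set.update_nil_left]
  have hkeysA : ((sub.foldl (fun d s => d.modify (key s) [] (fun g => g ++ [val s]))
      (sub.foldl (fun d s => d.insert (key s) ([] : List (List String))) PySem.Dict.empty))).keys
      = PySem.Set.ofList (sub.map key) := by
    rw [PySem.Dict.keys_foldl_modify_key, hkeys1, PySem.Set.update_eq_append_filter, hfilter,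
      List.append_nil]
  have hpair : ∀ (d : PySem.Dict String (List (List String))),
      sub.foldl (fun d s => d.modify (key s) [] (fun g => g ++ [val s])) d
      = (sub.map (fun s => (key s, val s))).foldl (fun d p => d.modify p.1 [] (fun g => g ++ [p.2])) d :=
    fun d => (List.foldl_map (f := fun s => (key s, val s))
      (g := fun d p => d.modify p.1 [] (fun g => g ++ [p.2])) (l := sub) (init := d)).symm
  rw [PySem.Dict.items_eq_map_keys _ hndA [], hkeysA]
  apply List.map_congr_left
  intro k hk
  have hkm : k ∈ sub.map key := by simpa using hk
  rw [hpair, PySem.Dict.getD_foldl_modify_append, getD_insert_nil_loop, if_pos hkm,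
    List.filter_map, List.map_map]
  rfl

-- ===== VERDICT (by name: the statement is the Claim_ definition above) =====
theorem parse_idf_spec : Claim_equal_parse_idf := by
  intro content _
  unfold Spec_parse_idf parse_idf parse_idf_alt
  simp only [clean_loop, List.nil_append, PySem.List.foldl_append_singleton_eq_map,
    ← PySem.Set.update_map_eq_foldl_add, PySem.Set.update_nil_left]
  rw [group_items]
  simp only [List.map_map]
  rfl
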